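-- pv_equiv track=rewrite | github.com/andywarburton/gr3ml1n-cyberdeck | sd/apps/text_input/app.py | _next_auto_name
-- ===== SOURCE A (Python) =====
-- def _next_auto_name(existing):
--     used = set()
--     for f in existing:
--         if f.startswith("note_") and f.endswith(".txt"):
--             try:
--                 used.add(int(f[5:8]))
--             except (ValueError, IndexError):
--                 pass
--     n = 1
--     while n in used:
--         n += 1
--     return "note_{:03d}.txt".format(n)
-- ===== SOURCE B (Python) =====
-- def _next_auto_name(existing):
--     vals = []
--     for f in existing:
--         if f.startswith("note_") and f.endswith(".txt"):
--             try:
--                 vals.append(int(f[5:8]))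
--             except (ValueError, IndexError):
--                 pass
--     candidate = 1
--     for v in sorted(vals):
--         if v == candidate:
--             candidate += 1
--         elif v > candidate:
--             break
--     return "note_{:03d}.txt".format(candidate)
-- ===== Notes on version B (the rewrite author's own statement) =====
-- stated objective: alternative
-- what changed: Replaces the hash-set plus unbounded while-n-in-used probe with collecting parsed indices into a list, sorting it, and a single candidate-advancing scan over the sorted values that stops at the first gap.
import Mathlib
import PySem

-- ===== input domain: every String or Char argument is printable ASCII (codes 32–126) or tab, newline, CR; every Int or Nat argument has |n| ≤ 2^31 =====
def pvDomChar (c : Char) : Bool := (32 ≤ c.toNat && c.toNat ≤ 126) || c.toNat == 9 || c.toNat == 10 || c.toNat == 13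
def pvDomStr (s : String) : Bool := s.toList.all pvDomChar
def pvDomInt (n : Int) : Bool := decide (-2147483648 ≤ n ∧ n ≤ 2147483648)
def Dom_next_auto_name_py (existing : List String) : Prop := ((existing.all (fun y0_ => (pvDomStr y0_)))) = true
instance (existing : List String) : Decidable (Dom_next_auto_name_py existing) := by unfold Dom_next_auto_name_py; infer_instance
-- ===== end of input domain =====

-- B replaces A's hash set + unbounded while-probe with sort-then-scan for the first gap; objective: alternative (same results, different algorithm).

-- ===== PORT A =====
-- shared parsing helper: the identical guard/try lines of both Pythons
-- ('if f.startswith("note_") and f.endswith(".txt"): int(f[5:8])'; the except-arm is the 'none' case;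
--  string slicing never raises IndexError, so the Option covers exactly the ValueError)
def pvParse? (f : String) : Option Int :=
  if PySem.Str.startswith f "note_" && PySem.Str.endswith f ".txt" then
    PySem.Int.ofChars? (PySem.List.slice f.toList (some 5) (some 8))
  else none

-- shared formatting helper: "note_{:03d}.txt".format(n); exact for the n ≥ 1 both programs produce
def pvFmtNote (n : Int) : String :=
  let ds := PySem.Int.toChars n
  String.ofList ("note_".toList ++ List.replicate (3 - ds.length) '0' ++ ds ++ ".txt".toList)

-- A's collection loop: used = set(); for f in existing: … used.add(…)
def pvUsed (existing : List String) : PySem.Set Int :=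
  existing.foldl (fun u f =>
    match pvParse? f with
    | some k => PySem.Set.add u k
    | none => u) PySem.Set.empty

-- A's 'n = 1; while n in used: n += 1'
def pvFirstFree (used : List Int) (n : Int) : Int :=
  if n ∈ used then pvFirstFree used (n + 1) else n
termination_by (used.filter (fun x => n ≤ x)).length
decreasing_by
  rename_i h
  have hsub : used.filter (fun x => n + 1 ≤ x) = (used.filter (fun x => n ≤ x)).filter (fun x => n + 1 ≤ x) := by
    rw [List.filter_filter]
    apply List.filter_congr
    intro x _
    by_cases h1 : n + 1 ≤ x <;> by_cases h2 : n ≤ x <;> simp_all <;> omega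
  rw [hsub]
  apply List.length_filter_lt_length_iff_exists.mpr
  exact ⟨n, List.mem_filter.mpr ⟨h, by simp⟩, by simp⟩

def next_auto_name_py (existing : List String) : String :=
  pvFmtNote (pvFirstFree (pvUsed existing) 1)

-- ===== PORT B =====
-- B's collection loop: vals = []; for f in existing: … vals.append(…)
def pvVals (existing : List String) : List Int :=
  existing.foldl (fun vals f =>
    match pvParse? f with
    | some k => vals ++ [k]
    | none => vals) []

-- B's scan: candidate = 1; for v in sorted(vals): advance on v == candidate, break on v > candidate
def pvScanGap : List Int → Int → Int
  | [], c => c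
  | v :: vs, c => if v = c then pvScanGap vs (c + 1) else if v > c then c else pvScanGap vs c

def next_auto_name_py_alt (existing : List String) : String :=
  pvFmtNote (pvScanGap (PySem.List.sorted (pvVals existing) (fun x => x) false) 1)

-- ===== PRECONDITION & SPEC =====
def Spec_next_auto_name_py (existing : List String) (out : String) : Prop := out = next_auto_name_py_alt existing
instance (existing : List String) (out : String) : Decidable (Spec_next_auto_name_py existing out) := by unfold Spec_next_auto_name_py; infer_instance

-- ===== CLAIM (what is proved, stated in full; the proofs are below) =====
def Claim_equal_next_auto_name_py : Prop := ∀ (existing : List String), Dom_next_auto_name_py existing → Spec_next_auto_name_py existing (next_auto_name_py existing)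

-- ===== LEMMAS AND PROOFS =====

-- the two collection loops gather the same membership
theorem pvUsed_mem_iff_aux (l : List String) (u : PySem.Set Int) (vals : List Int)
    (h : ∀ x, x ∈ u ↔ x ∈ vals) :
    ∀ x, x ∈ l.foldl (fun u f => match pvParse? f with | some k => PySem.Set.add u k | none => u) u ↔
         x ∈ l.foldl (fun vals f => match pvParse? f with | some k => vals ++ [k] | none => vals) vals := by
  induction l generalizing u vals with
  | nil => simpa using h
  | cons f t ih =>
    simp only [List.foldl_cons]
    cases hp : pvParse? f with
    | none => exact ih u vals h
    | some k =>
      apply ih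
      intro x
      rw [PySem.Set.mem_add]
      simp [h x, or_comm]

theorem pvUsed_mem_iff (existing : List String) (x : Int) :
    x ∈ pvUsed existing ↔ x ∈ pvVals existing := by
  exact pvUsed_mem_iff_aux existing PySem.Set.empty [] (by simp [PySem.Set.empty]) x

-- characterization of A's while loop: least m ≥ c outside used
theorem pvFirstFree_spec (used : List Int) (c : Int) :
    c ≤ pvFirstFree used c ∧ pvFirstFree used c ∉ used ∧
      ∀ k, c ≤ k → k < pvFirstFree used c → k ∈ used := by
  fun_induction pvFirstFree used c with
  | case1 c hmem ih =>
    obtain ⟨h1, h2, h3⟩ := ih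
    refine ⟨by omega, h2, ?_⟩
    intro k hk1 hk2
    by_cases hk : k = c
    · exact hk ▸ hmem
    · exact h3 k (by omega) hk2
  | case2 c hmem =>
    exact ⟨le_refl c, hmem, fun k h1 h2 => absurd h1 (by omega)⟩

-- characterization of B's scan over a sorted list: least m ≥ c outside the list
theorem pvScanGap_spec (l : List Int) : ∀ c, l.Pairwise (· ≤ ·) →
    c ≤ pvScanGap l c ∧ pvScanGap l c ∉ l ∧
      ∀ k, c ≤ k → k < pvScanGap l c → k ∈ l := by
  induction l with
  | nil => intro c _; simp [pvScanGap]
  | cons v vs ih =>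
    intro c hp
    have hhead : ∀ y ∈ vs, v ≤ y := (List.pairwise_cons.mp hp).1
    have htail : vs.Pairwise (· ≤ ·) := (List.pairwise_cons.mp hp).2
    by_cases hv : v = c
    · obtain ⟨h1, h2, h3⟩ := ih (c + 1) htail
      rw [pvScanGap, if_pos hv]
      refine ⟨by omega, ?_, ?_⟩
      · intro hmem
        rcases List.mem_cons.mp hmem with h | h
        · omega
        · exact h2 h
      · intro k hk1 hk2
        by_cases hkc : k = c
        · exact hkc ▸ hv ▸ List.mem_cons_self
        · exact List.mem_cons_of_mem v (h3 k (by omega) hk2)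
    · by_cases hgt : v > c
      · rw [pvScanGap, if_neg hv, if_pos hgt]
        refine ⟨le_refl c, ?_, fun k h1 h2 => absurd h1 (by omega)⟩
        intro hmem
        rcases List.mem_cons.mp hmem with h | h
        · omega
        · have := hhead c h; omega
      · obtain ⟨h1, h2, h3⟩ := ih c htail
        rw [pvScanGap, if_neg hv, if_neg hgt]
        refine ⟨h1, ?_, ?_⟩
        · intro hmem
          rcases List.mem_cons.mp hmem with h | h
          · omega
          · exact h2 h
        · intro k hk1 hk2
          exact List.mem_cons_of_mem v (h3 k hk1 hk2)

-- the two "least value ≥ c outside the same membership" agree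
theorem pvCore_eq (existing : List String) :
    pvFirstFree (pvUsed existing) 1 = pvScanGap (PySem.List.sorted (pvVals existing) (fun x => x) false) 1 := by
  set l := PySem.List.sorted (pvVals existing) (fun x => x) false with hl
  have hmem : ∀ x, x ∈ l ↔ x ∈ pvUsed existing := by
    intro x
    rw [hl, PySem.List.mem_sorted, pvUsed_mem_iff]
  have hpair : l.Pairwise (· ≤ ·) := by
    have := PySem.List.sorted_pairwise (xs := pvVals existing) (key := fun x => x)
    simpa using this
  obtain ⟨a1, a2, a3⟩ := pvFirstFree_spec (pvUsed existing) 1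
  obtain ⟨b1, b2, b3⟩ := pvScanGap_spec l 1 hpair
  rcases lt_trichotomy (pvFirstFree (pvUsed existing) 1) (pvScanGap l 1) with h | h | h
  · exact absurd ((hmem _).mp (b3 _ a1 h)) a2
  · exact h
  · exact absurd ((hmem _).mpr (a3 _ b1 h)) b2

-- ===== VERDICT (by name: the statement is the Claim_ definition above) =====
theorem next_auto_name_py_spec : Claim_equal_next_auto_name_py := by
  intro existing _
  unfold Spec_next_auto_name_py next_auto_name_py next_auto_name_py_alt
  rw [pvCore_eq]
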